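-- pv_equiv track=rewrite | github.com/TenSzalik/Challenges | the_observed_pin/main.py | generate_numbers
-- ===== SOURCE A (Python) =====
-- def generate_numbers(possible: list):
--     def inner(current_index, current_number):
--         if current_index == len(possible):
--             result.append(current_number)
--             return None
--
--         for digit in possible[current_index]:
--             new_number = current_number + str(digit)
--             inner(current_index + 1, new_number)
--
--     result = []
--     inner(0, "")
--     return result
-- ===== SOURCE B (Python) =====
-- def generate_numbers(possible: list):
--     result = [""]
--     for group in possible:
--         result = [prefix + str(digit) for prefix in result for digit in group]
--     return result
-- ===== Notes on version B (the rewrite author's own statement) =====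
-- stated objective: simpler
-- what changed: Replaces the nested recursion with a shared mutable result list by an iterative bottom-up builder that extends a running list of partial strings with one loop per group.
import Mathlib
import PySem

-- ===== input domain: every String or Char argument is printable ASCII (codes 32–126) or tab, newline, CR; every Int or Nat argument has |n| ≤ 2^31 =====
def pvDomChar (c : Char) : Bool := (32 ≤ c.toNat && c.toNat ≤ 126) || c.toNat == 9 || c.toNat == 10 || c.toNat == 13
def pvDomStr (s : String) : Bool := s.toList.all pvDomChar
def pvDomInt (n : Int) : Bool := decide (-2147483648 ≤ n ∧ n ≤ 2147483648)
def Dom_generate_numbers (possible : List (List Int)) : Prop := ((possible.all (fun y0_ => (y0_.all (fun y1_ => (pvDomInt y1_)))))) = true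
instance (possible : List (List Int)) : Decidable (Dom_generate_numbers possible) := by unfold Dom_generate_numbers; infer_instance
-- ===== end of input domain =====

-- B replaces A's recursion (shared result list) by an iterative bottom-up builder over the groups; same values.
-- ===== PORT A =====
def generate_numbers_inner (possible : List (List Int)) : List (List Int) → String → List String
  | [], current_number => [current_number]
  | group :: rest, current_number =>
      group.foldl (fun acc digit =>
        acc ++ generate_numbers_inner possible rest (current_number ++ PySem.Int.toStr digit)) []

def generate_numbers (possible : List (List Int)) : List String :=
  generate_numbers_inner possible possible ""

-- ===== PORT B =====
def generate_numbers_alt (possible : List (List Int)) : List String :=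
  possible.foldl (fun result group =>
    result.flatMap (fun pfx => group.map (fun digit => pfx ++ PySem.Int.toStr digit))) [""]

-- ===== PRECONDITION & SPEC =====
def Spec_generate_numbers (possible : List (List Int)) (out : List String) : Prop := out = generate_numbers_alt possible
instance (possible : List (List Int)) (out : List String) : Decidable (Spec_generate_numbers possible out) := by unfold Spec_generate_numbers; infer_instance

-- ===== CLAIM (what is proved, stated in full; the proofs are below) =====
def Claim_equal_generate_numbers : Prop := ∀ (possible : List (List Int)), Dom_generate_numbers possible → Spec_generate_numbers possible (generate_numbers possible)

-- ===== LEMMAS AND PROOFS =====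

-- the B-side step as an abbreviation for the lemmas
def gnStep : List String → List Int → List String :=
  fun result group => result.flatMap (fun pfx => group.map (fun digit => pfx ++ PySem.Int.toStr digit))

theorem gnStep_nil (rest : List (List Int)) : rest.foldl gnStep [] = [] := by
  induction rest with
  | nil => rfl
  | cons g r ih => simpa [gnStep] using ih

theorem gnStep_append (rest : List (List Int)) (l1 l2 : List String) :
    rest.foldl gnStep (l1 ++ l2) = rest.foldl gnStep l1 ++ rest.foldl gnStep l2 := by
  induction rest generalizing l1 l2 with
  | nil => rfl
  | cons g r ih => simpa [gnStep, List.flatMap_append] using ih _ _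

theorem gnStep_flatMap (rest : List (List Int)) (l : List String) :
    l.flatMap (fun s => rest.foldl gnStep [s]) = rest.foldl gnStep l := by
  induction l with
  | nil => simp [gnStep_nil]
  | cons s t ih =>
      rw [List.flatMap_cons, ih, ← gnStep_append]
      simp

theorem foldl_append_flatMap {α β : Type} (g : List α) (f : α → List β) :
    g.foldl (fun acc d => acc ++ f d) [] = g.flatMap f := by
  suffices h : ∀ init : List β, g.foldl (fun acc d => acc ++ f d) init = init ++ g.flatMap f by
    simpa using h []
  induction g with
  | nil => intro init; simp
  | cons d t ih => intro init; simp [List.foldl_cons, ih]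

theorem inner_eq_foldl (possible : List (List Int)) (rest : List (List Int)) (cur : String) :
    generate_numbers_inner possible rest cur = rest.foldl gnStep [cur] := by
  induction rest generalizing cur with
  | nil => rfl
  | cons g r ih =>
      show g.foldl (fun acc digit =>
          acc ++ generate_numbers_inner possible r (cur ++ PySem.Int.toStr digit)) [] = _
      rw [foldl_append_flatMap g (fun d => generate_numbers_inner possible r (cur ++ PySem.Int.toStr d))]
      have : g.flatMap (fun d => generate_numbers_inner possible r (cur ++ PySem.Int.toStr d))
          = (g.map (fun d => cur ++ PySem.Int.toStr d)).flatMap (fun s => r.foldl gnStep [s]) := by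
        simp [List.flatMap_map, ih]
      rw [this, gnStep_flatMap]
      simp [List.foldl_cons, gnStep]

-- ===== VERDICT (by name: the statement is the Claim_ definition above) =====
theorem generate_numbers_spec : Claim_equal_generate_numbers := by
  intro possible _
  show generate_numbers possible = generate_numbers_alt possible
  rw [generate_numbers, inner_eq_foldl]
  rfl
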